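-- pv_equiv track=rewrite | github.com/oOSomnus/HydraRAG | Hydra_run/utilts.py | merge_paths_by_relations_remove_usless
-- ===== SOURCE A (Python) =====
-- def merge_paths_by_relations_remove_usless(paths):
--     from collections import defaultdict
--     import itertools
--
--     # Organize paths by their relation sequences
--     paths_by_relations = defaultdict(list)
--     for path in paths:
--         relations = tuple(path[i] for i in range(1, len(path), 2))
--         paths_by_relations[relations].append(path)
--
--     # Merge paths with the same relation sequences
--     merged_paths = []
--     for relations, paths in paths_by_relations.items():
--         # This will hold the final merged path
--         merged_path = []
--         # We know all paths have the same length and relations, so we iterate through entities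
--         for i in range(0, len(paths[0]), 2):  # Only iterate over entity indices
--             # Gather all entities at this position across all paths
--             entities = {path[i] for path in paths}
--             if len(entities) > 1:
--
--                 merged_entity = "{" + ", ".join(sorted(set(entities))) + "}"
--
--             else:
--                 merged_entity = list(entities)[0]  # Just take the single entity
--             merged_path.append(merged_entity)
--             if i < len(paths[0]) - 1:  # Add the relation if it's not the last element
--                 merged_path.append(paths[0][i+1])
--
--         merged_paths.append(merged_path)
--
--     return merged_paths
-- ===== SOURCE B (Python) =====
-- def merge_paths_by_relations_remove_usless(paths):
--     # One pass: an ordered dict keyed by the relation sequence holds one entity-set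
--     # per position, filled online; emission zips cells with the stored relations.
--     merged = {}
--     for path in paths:
--         ents, rels, odd = [], [], False
--         for x in path:
--             if odd:
--                 rels.append(x)
--                 odd = False
--             else:
--                 ents.append(x)
--                 odd = True
--         key = tuple(rels)
--         cols = merged.get(key)
--         if cols is None:
--             merged[key] = [{e} for e in ents]
--         else:
--             for col, e in zip(cols, ents):
--                 col.add(e)
--     out = []
--     for rels, cols in merged.items():
--         cells = [next(iter(s)) if len(s) == 1 else "{" + ", ".join(sorted(s)) + "}"
--                  for s in cols]
--         path = []
--         for cell, rel in zip(cells, rels):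
--             path += [cell, rel]
--         if len(rels) < len(cells):
--             path.append(cells[-1])
--         out.append(path)
--     return out
-- ===== Notes on version B (the rewrite author's own statement) =====
-- stated objective: alternative
-- what changed: One streaming pass keeps, per relation sequence, an ordered-dict entry holding one entity set per position (updated online by zipping each incoming path's entities into the sets); emission zips the rendered cells with the stored relations. A instead stores every path per key and then transposes each group position by position with an index loop.
import Mathlib
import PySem

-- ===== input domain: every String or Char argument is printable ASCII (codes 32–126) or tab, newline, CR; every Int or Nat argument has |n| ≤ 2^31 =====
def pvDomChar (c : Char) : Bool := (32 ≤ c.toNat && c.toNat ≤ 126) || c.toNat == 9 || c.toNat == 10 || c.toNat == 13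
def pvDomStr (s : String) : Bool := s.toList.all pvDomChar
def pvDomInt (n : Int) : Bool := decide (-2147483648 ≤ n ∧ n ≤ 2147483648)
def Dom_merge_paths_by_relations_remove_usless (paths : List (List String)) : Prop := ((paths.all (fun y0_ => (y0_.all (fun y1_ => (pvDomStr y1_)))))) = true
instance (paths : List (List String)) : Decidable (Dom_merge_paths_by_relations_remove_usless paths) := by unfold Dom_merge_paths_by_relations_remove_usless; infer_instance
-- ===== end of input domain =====

-- B re-implements the merge in one pass: an ordered dict keyed by the relation sequence holds one
-- entity-set per position, filled online, instead of A's "collect all paths per key, then transpose".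
-- Equivalence is proved on Pre_ (exactly the inputs where A does not raise IndexError).

-- ===== PORT A =====
def aRels (path : List String) : List String :=
  (PySem.List.pyRange 1 (path.length : Int) 2).map (fun i => PySem.List.pyGetD path i "")

def aEntities (g : List (List String)) (i : Int) : PySem.Set String :=
  g.foldl (fun s path => PySem.Set.add s (PySem.List.pyGetD path i "")) PySem.Set.empty

def aCell (g : List (List String)) (i : Int) : String :=
  let entities := aEntities g i
  if 1 < entities.length then
    "{" ++ PySem.Str.join ", " (PySem.List.sorted (PySem.Set.ofList entities) (fun x => x) false) ++ "}"
  else PySem.List.pyGetD entities 0 ""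

def aMerge (g : List (List String)) : List String :=
  let p0 := PySem.List.pyGetD g 0 []
  (PySem.List.pyRange 0 (p0.length : Int) 2).foldl
    (fun acc i =>
      let acc2 := acc ++ [aCell g i]
      if i < (p0.length : Int) - 1 then acc2 ++ [PySem.List.pyGetD p0 (i + 1) ""] else acc2) []

def merge_paths_by_relations_remove_usless (paths : List (List String)) : List (List String) :=
  let d := paths.foldl (fun d path => d.modify (aRels path) [] (fun g => g ++ [path])) PySem.Dict.empty
  d.items.foldl (fun acc kg => acc ++ [aMerge kg.2]) []

-- ===== PORT B =====
def bSplit (path : List String) : List String × List String :=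
  let st := path.foldl
    (fun (st : List String × List String × Bool) x =>
      if st.2.2 then (st.1, st.2.1 ++ [x], false) else (st.1 ++ [x], st.2.1, true))
    ([], [], false)
  (st.1, st.2.1)

def bStep (d : PySem.Dict (List String) (List (PySem.Set String))) (path : List String) :
    PySem.Dict (List String) (List (PySem.Set String)) :=
  let er := bSplit path
  match d.get? er.2 with
  | none => d.insert er.2 (er.1.map (fun e => PySem.Set.add PySem.Set.empty e))
  | some cols =>
      -- in-place 'for col, e in zip(cols, ents): col.add(e)': columns beyond ents are kept
      d.insert er.2 (List.zipWith (fun s e => PySem.Set.add s e) cols er.1 ++ cols.drop er.1.length)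

def bCell (s : PySem.Set String) : String :=
  if s.length == 1 then PySem.List.pyGetD s 0 ""
  else "{" ++ PySem.Str.join ", " (PySem.List.sorted s (fun x => x) false) ++ "}"

def bEmit (rels : List String) (cols : List (PySem.Set String)) : List String :=
  let cells := cols.map bCell
  let path := (List.zip cells rels).foldl (fun a cr => a ++ [cr.1, cr.2]) []
  if rels.length < cells.length then path ++ [PySem.List.pyGetD cells (-1) ""] else path

def merge_paths_by_relations_remove_usless_alt (paths : List (List String)) : List (List String) :=
  (paths.foldl bStep PySem.Dict.empty).items.foldl (fun acc rc => acc ++ [bEmit rc.1 rc.2]) []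

-- ===== PRECONDITION & SPEC =====
-- pvSplit path = (entities at even indices, relations at odd indices); used to state Pre_.
def pvSplit : List String → List String × List String
  | [] => ([], [])
  | x :: t => (x :: (pvSplit t).2, (pvSplit t).1)

-- Pre_ excludes exactly the inputs where A raises IndexError: a path that is shorter than the first
-- path sharing its relation sequence (A indexes every group member at the first member's positions).
def Pre_merge_paths_by_relations_remove_usless (paths : List (List String)) : Prop :=
  ∀ p ∈ paths,
    ((paths.filter (fun q => (pvSplit q).2 == (pvSplit p).2)).headD []).length ≤ p.length
instance (paths : List (List String)) : Decidable (Pre_merge_paths_by_relations_remove_usless paths) := by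
  unfold Pre_merge_paths_by_relations_remove_usless; infer_instance

def pvWitness_merge_paths_by_relations_remove_usless : List (List String) :=
  [["a", "r1", "b"], ["c", "r1", "d"], ["x"]]

def Spec_merge_paths_by_relations_remove_usless (paths : List (List String)) (out : List (List String)) : Prop := out = merge_paths_by_relations_remove_usless_alt paths
instance (paths : List (List String)) (out : List (List String)) : Decidable (Spec_merge_paths_by_relations_remove_usless paths out) := by unfold Spec_merge_paths_by_relations_remove_usless; infer_instance

-- ===== CLAIM (what is proved, stated in full; the proofs are below) =====
def Claim_equal_merge_paths_by_relations_remove_usless : Prop := ∀ (paths : List (List String)), Dom_merge_paths_by_relations_remove_usless paths → Pre_merge_paths_by_relations_remove_usless paths → Spec_merge_paths_by_relations_remove_usless paths (merge_paths_by_relations_remove_usless paths)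

-- ===== LEMMAS AND PROOFS =====

-- index characterisation of pvSplit
lemma pvSplit_map (p : List String) :
    (pvSplit p).1 = (List.range ((p.length + 1) / 2)).map (fun j => p.getD (2 * j) "") ∧
    (pvSplit p).2 = (List.range (p.length / 2)).map (fun j => p.getD (2 * j + 1) "") := by
  induction p with
  | nil => simp [pvSplit]
  | cons x t ih =>
    obtain ⟨ih1, ih2⟩ := ih
    constructor
    · show x :: (pvSplit t).2 = _
      have h2 : ((x :: t).length + 1) / 2 = t.length / 2 + 1 := by
        simp [List.length_cons]; omega
      rw [h2, List.range_succ_eq_map, List.map_cons, List.map_map]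
      refine List.cons_eq_cons.mpr ⟨by simp, ?_⟩
      rw [ih2]
      apply List.map_congr_left
      intro a _
      have h3 : 2 * (a + 1) = (2 * a + 1) + 1 := by ring
      simp [h3]
    · show (pvSplit t).1 = _
      have h2 : (x :: t).length / 2 = (t.length + 1) / 2 := by
        simp [List.length_cons]
      rw [h2, ih1]
      apply List.map_congr_left
      intro j _
      simp

lemma pvSplit_len (p : List String) :
    (pvSplit p).1.length = (p.length + 1) / 2 ∧ (pvSplit p).2.length = p.length / 2 := by
  obtain ⟨h1, h2⟩ := pvSplit_map p
  constructor <;> simp [h1, h2]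

-- B's toggle loop computes pvSplit
lemma toggle1 (p : List String) : ∀ (e r : List String) (b : Bool),
    (p.foldl (fun (st : List String × List String × Bool) x =>
      if st.2.2 then (st.1, st.2.1 ++ [x], false) else (st.1 ++ [x], st.2.1, true)) (e, r, b)).1
    = e ++ (if b then (pvSplit p).2 else (pvSplit p).1) := by
  induction p with
  | nil => intro e r b; cases b <;> simp [pvSplit]
  | cons x t ih =>
    intro e r b
    cases b <;> simp [List.foldl_cons, ih, pvSplit]

lemma toggle2 (p : List String) : ∀ (e r : List String) (b : Bool),
    (p.foldl (fun (st : List String × List String × Bool) x =>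
      if st.2.2 then (st.1, st.2.1 ++ [x], false) else (st.1 ++ [x], st.2.1, true)) (e, r, b)).2.1
    = r ++ (if b then (pvSplit p).1 else (pvSplit p).2) := by
  induction p with
  | nil => intro e r b; cases b <;> simp [pvSplit]
  | cons x t ih =>
    intro e r b
    cases b <;> simp [List.foldl_cons, ih, pvSplit]

lemma bSplit_eq (p : List String) : bSplit p = ((pvSplit p).1, (pvSplit p).2) := by
  unfold bSplit
  have h1 := toggle1 p [] [] false
  have h2 := toggle2 p [] [] false
  simp at h1 h2
  simp [h1, h2]

-- A's relation-key loop computes (pvSplit p).2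
lemma aRels_eq (p : List String) : aRels p = (pvSplit p).2 := by
  unfold aRels
  rw [PySem.List.pyRange_of_pos 1 (p.length : Int) (by norm_num)]
  obtain ⟨-, h2⟩ := pvSplit_map p
  rw [h2]
  have hcnt : (if (1 : Int) < (p.length : Int) then (((p.length : Int) - 1 + 2 - 1) / 2).toNat else 0)
      = p.length / 2 := by
    split_ifs with h <;> omega
  rw [hcnt, List.map_map]
  apply List.map_congr_left
  intro j hj
  simp only [Function.comp_def]
  have hc : (1 : Int) + 2 * (j : Int) = ((2 * j + 1 : Nat) : Int) := by push_cast; ring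
  rw [hc, PySem.List.pyGetD_natCast]

-- group of a key
def pvGroup (paths : List (List String)) (k : List String) : List (List String) :=
  paths.filter (fun q => (pvSplit q).2 == k)

-- characterisation of A's dict
lemma Achar (paths : List (List String)) :
    (paths.foldl (fun d path => d.modify (aRels path) [] (fun g => g ++ [path])) PySem.Dict.empty).items
    = (PySem.Set.ofList (paths.map (fun p => (pvSplit p).2))).map
        (fun k => (k, pvGroup paths k)) := by
  have hkeys : (paths.foldl (fun d path => d.modify (aRels path) [] (fun g => g ++ [path])) PySem.Dict.empty).keys
      = PySem.Set.ofList (paths.map aRels) := by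
    have := PySem.Dict.keys_foldl_modify_key paths aRels [] (fun d x g => g ++ [x]) PySem.Dict.empty
    simpa [PySem.Dict.keys_empty, PySem.Set.update_empty] using this
  have hnodup : (paths.foldl (fun d path => d.modify (aRels path) [] (fun g => g ++ [path])) PySem.Dict.empty).keys.Nodup := by
    apply PySem.Dict.nodup_keys_foldl_modify_key paths aRels [] (fun d x g => g ++ [x])
    simp [PySem.Dict.keys_empty]
  rw [PySem.Dict.items_eq_map_keys _ hnodup [], hkeys]
  have hmapR : paths.map aRels = paths.map (fun p => (pvSplit p).2) := by
    apply List.map_congr_left; intro p _; exact aRels_eq p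
  rw [hmapR]
  apply List.map_congr_left
  intro k hk
  congr 1
  have hfold : paths.foldl (fun d path => d.modify (aRels path) [] (fun g => g ++ [path])) PySem.Dict.empty
      = (paths.map (fun p => (aRels p, p))).foldl (fun d q => d.modify q.1 [] (fun g => g ++ [q.2])) PySem.Dict.empty := by
    rw [List.foldl_map]
  rw [hfold, PySem.Dict.getD_foldl_modify_append]
  unfold pvGroup
  simp only [PySem.Dict.getD_empty, List.nil_append, List.filter_map, Function.comp_def, List.map_map]
  rw [List.map_id']
  apply List.filter_congr
  intro p _
  rw [aRels_eq]

-- find? over a key-tagged map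
lemma findmap {ν : Type} (K : List (List String)) (v : List String → ν) (k : List String) :
    List.find? (fun q => q.1 == k) (K.map (fun j => (j, v j)))
    = if k ∈ K then some (k, v k) else none := by
  induction K with
  | nil => simp
  | cons j K ih =>
    by_cases hj : j = k
    · subst hj; simp
    · have hb : ((j, v j).1 == k) = false := by simpa using hj
      simp only [List.map_cons, List.find?_cons, hb, ih]
      have hk : k ≠ j := fun h => hj h.symm
      simp [hk]

-- B's column accumulation, proof-side
def accCols (cols : List (PySem.Set String)) (p : List String) : List (PySem.Set String) :=
  List.zipWith (fun s e => PySem.Set.add s e) cols (pvSplit p).1 ++ cols.drop (pvSplit p).1.length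

def colsOf : List (List String) → List (PySem.Set String)
  | [] => []
  | p :: g => g.foldl accCols ((pvSplit p).1.map (fun e => PySem.Set.add PySem.Set.empty e))

lemma colsOf_append (g : List (List String)) (p : List String) (hg : g ≠ []) :
    colsOf (g ++ [p]) = accCols (colsOf g) p := by
  cases g with
  | nil => exact absurd rfl hg
  | cons h t => simp [colsOf, List.foldl_append]

-- reductions of bStep
lemma bStep_some (d : PySem.Dict (List String) (List (PySem.Set String))) (p : List String)
    (cols : List (PySem.Set String)) (hd : d.get? (pvSplit p).2 = some cols) :
    bStep d p = d.insert (pvSplit p).2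
      (List.zipWith (fun s e => PySem.Set.add s e) cols (pvSplit p).1 ++ cols.drop (pvSplit p).1.length) := by
  unfold bStep
  rw [bSplit_eq]
  dsimp only
  rw [hd]

lemma bStep_none (d : PySem.Dict (List String) (List (PySem.Set String))) (p : List String)
    (hd : d.get? (pvSplit p).2 = none) :
    bStep d p = d.insert (pvSplit p).2 ((pvSplit p).1.map (fun e => PySem.Set.add PySem.Set.empty e)) := by
  unfold bStep
  rw [bSplit_eq]
  dsimp only
  rw [hd]

-- characterisation of B's dict
lemma Bchar (paths : List (List String)) :
    (paths.foldl bStep PySem.Dict.empty).items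
    = (PySem.Set.ofList (paths.map (fun p => (pvSplit p).2))).map
        (fun k => (k, colsOf (pvGroup paths k))) := by
  induction paths using List.reverseRecOn with
  | nil => simp [PySem.Dict.empty]
  | append_singleton l p ih =>
    rw [List.foldl_append, List.foldl_cons, List.foldl_nil]
    set K := PySem.Set.ofList (l.map (fun p => (pvSplit p).2)) with hK
    set r := (pvSplit p).2 with hr
    have hgroups : ∀ k, pvGroup (l ++ [p]) k = pvGroup l k ++ (if r == k then [p] else []) := by
      intro k
      unfold pvGroup
      rw [List.filter_append]
      congr 1
      by_cases hc : ((pvSplit p).2 == k) <;> simp [hr, hc]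
    have hofl0 : (l ++ [p]).map (fun q => (pvSplit q).2) = l.map (fun q => (pvSplit q).2) ++ [r] := by
      rw [List.map_append]; simp [hr]
    have hkeysl : (l.foldl bStep PySem.Dict.empty).keys = K := by
      simp only [PySem.Dict.keys, ih, List.map_map]
      simp [Function.comp_def]
    by_cases hmem : r ∈ K
    · -- existing key: in-place update
      have hsome : (l.foldl bStep PySem.Dict.empty).get? r = some (colsOf (pvGroup l r)) := by
        simp only [PySem.Dict.get?, ih]
        rw [findmap, if_pos hmem]
        rfl
      have hcont : (l.foldl bStep PySem.Dict.empty).contains r = true := by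
        rw [PySem.Dict.contains_iff_mem_keys, hkeysl]; exact hmem
      have hgrne : pvGroup l r ≠ [] := by
        have hmem' : r ∈ l.map (fun p => (pvSplit p).2) := by
          rw [hK] at hmem; exact (PySem.Set.mem_ofList _ _).mp hmem
        obtain ⟨q, hq, hqr⟩ := List.mem_map.mp hmem'
        intro hnil
        have hqg : q ∈ pvGroup l r := by
          unfold pvGroup; rw [List.mem_filter]; exact ⟨hq, by simp [hqr]⟩
        rw [hnil] at hqg
        simp at hqg
      rw [bStep_some _ _ _ hsome, PySem.Dict.items_insert_of_contains _ _ hcont, ih, List.map_map]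
      rw [hofl0, PySem.Set.ofList_append_singleton, ← hK, PySem.Set.add_of_mem hmem]
      apply List.map_congr_left
      intro k hk
      simp only [Function.comp_def]
      by_cases hkr : k = r
      · subst hkr
        rw [if_pos (by simp)]
        rw [hgroups r, if_pos (by simp), colsOf_append _ _ hgrne]
        rfl
      · rw [if_neg (by simpa using hkr)]
        rw [hgroups k, if_neg (by simpa using Ne.symm hkr), List.append_nil]
    · -- fresh key: appended at the end
      have hnone : (l.foldl bStep PySem.Dict.empty).get? r = none := by
        simp only [PySem.Dict.get?, ih]
        rw [findmap, if_neg hmem]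
        rfl
      have hcont : (l.foldl bStep PySem.Dict.empty).contains r = false := by
        have : ¬ (l.foldl bStep PySem.Dict.empty).contains r = true := by
          rw [PySem.Dict.contains_iff_mem_keys, hkeysl]; exact hmem
        simpa using this
      have hgrnil : pvGroup l r = [] := by
        unfold pvGroup
        rw [List.filter_eq_nil_iff]
        intro q hq hqr
        apply hmem
        rw [hK, PySem.Set.mem_ofList]
        exact List.mem_map.mpr ⟨q, hq, by simpa using hqr⟩
      rw [bStep_none _ _ hnone, PySem.Dict.items_insert_of_not_contains _ _ hcont, ih]
      rw [hofl0, PySem.Set.ofList_append_singleton, ← hK, PySem.Set.add_of_not_mem hmem]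
      rw [List.map_append]
      congr 1
      · apply List.map_congr_left
        intro k hk
        have hkr : k ≠ r := fun hh => hmem (hh ▸ hk)
        rw [hgroups k, if_neg (by simpa using Ne.symm hkr), List.append_nil]
      · simp only [List.map_cons, List.map_nil]
        rw [hgroups r, hgrnil, if_pos (by simp), List.nil_append]
        simp [colsOf]

-- zipWith over a range-map
lemma zipmap (n : Nat) (f : Nat → PySem.Set String) (es : List String) (hn : n ≤ es.length) :
    List.zipWith (fun s e => PySem.Set.add s e) ((List.range n).map f) es
    = (List.range n).map (fun j => (f j).add (es.getD j "")) := by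
  apply List.ext_getElem
  · simp; omega
  · intro i h1 h2
    have hi : i < n := by simpa using h2
    simp [List.getElem_zipWith, List.getD_eq_getElem?_getD,
      List.getElem?_eq_getElem (by omega : i < es.length)]

-- column accumulation = per-position entity sets
lemma colsAux (t : List (List String)) (n : Nat) :
    ∀ (f : Nat → PySem.Set String), (∀ p ∈ t, n ≤ (pvSplit p).1.length) →
    t.foldl accCols ((List.range n).map f)
    = (List.range n).map (fun j => t.foldl (fun s p => s.add ((pvSplit p).1.getD j "")) (f j)) := by
  induction t with
  | nil => intro f _; simp
  | cons p t ih =>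
    intro f hlen
    rw [List.foldl_cons]
    have hstep : accCols ((List.range n).map f) p
        = (List.range n).map (fun j => (f j).add ((pvSplit p).1.getD j "")) := by
      unfold accCols
      rw [List.drop_eq_nil_of_le (by simpa using hlen p (by simp)), List.append_nil]
      exact zipmap n f (pvSplit p).1 (hlen p (by simp))
    rw [hstep, ih _ (fun q hq => hlen q (by simp [hq]))]
    simp only [List.foldl_cons]

lemma colsOf_char (h : List String) (t : List (List String))
    (hl : ∀ p ∈ t, h.length ≤ p.length) :
    colsOf (h :: t) = (List.range ((h.length + 1) / 2)).map (fun (j : Nat) => aEntities (h :: t) (2 * (j : Int))) := by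
  simp only [colsOf]
  obtain ⟨hm1, -⟩ := pvSplit_map h
  rw [hm1, List.map_map]
  rw [show ((fun e => PySem.Set.add PySem.Set.empty e) ∘ fun j => h.getD (2 * j) "")
      = fun j => PySem.Set.add PySem.Set.empty (h.getD (2 * j) "") from rfl]
  rw [colsAux t ((h.length + 1) / 2) _ (fun p hp => by
    have h1 := hl p hp
    have h2 := (pvSplit_len p).1
    omega)]
  apply List.map_congr_left
  intro j hj
  have hj' : j < (h.length + 1) / 2 := by simpa using hj
  unfold aEntities
  rw [List.foldl_cons]
  have hh : PySem.List.pyGetD h (2 * (j : Int)) "" = h.getD (2 * j) "" := by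
    rw [show (2 * (j : Int)) = ((2 * j : Nat) : Int) from by push_cast; ring, PySem.List.pyGetD_natCast]
  rw [hh]
  apply PySem.List.foldl_congr_mem
  intro s p hp
  have hplen := hl p hp
  have hpm := (pvSplit_map p).1
  have hjp : j < (p.length + 1) / 2 := by omega
  have hgd : (pvSplit p).1.getD j "" = p.getD (2 * j) "" := by
    rw [hpm, PySem.List.getD_map_range _ _ _ _ hjp]
  rw [hgd]
  congr 1
  rw [show (2 * (j : Int)) = ((2 * j : Nat) : Int) from by push_cast; ring, PySem.List.pyGetD_natCast]

-- entity sets are nonempty nodup sets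
lemma entities_nodup (g : List (List String)) (i : Int) : (aEntities g i).Nodup := by
  unfold aEntities
  generalize hacc : (PySem.Set.empty : PySem.Set String) = acc
  have hnd : acc.Nodup := by rw [← hacc]; exact List.nodup_nil
  clear hacc
  induction g generalizing acc with
  | nil => simpa using hnd
  | cons p t ih => exact ih _ (PySem.Set.nodup_add _ _ hnd)

lemma entities_ne_nil (h : List String) (t : List (List String)) (i : Int) :
    aEntities (h :: t) i ≠ [] := by
  have hm : PySem.List.pyGetD h i "" ∈ aEntities (h :: t) i := by
    unfold aEntities
    rw [show ((h :: t).foldl (fun s path => PySem.Set.add s (PySem.List.pyGetD path i "")) PySem.Set.empty)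
        = ((h :: t).foldl (fun s path => PySem.Set.add s ((fun path => PySem.List.pyGetD path i "") path)) PySem.Set.empty) from rfl]
    rw [PySem.Set.mem_foldl_add]
    exact Or.inr ⟨h, by simp, rfl⟩
  exact List.ne_nil_of_mem hm

lemma cell_eq (h : List String) (t : List (List String)) (i : Int) :
    bCell (aEntities (h :: t) i) = aCell (h :: t) i := by
  have hform : aCell (h :: t) i
      = if 1 < (aEntities (h :: t) i).length then
          "{" ++ PySem.Str.join ", " (PySem.List.sorted (PySem.Set.ofList (aEntities (h :: t) i)) (fun x => x) false) ++ "}"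
        else PySem.List.pyGetD (aEntities (h :: t) i) 0 "" := rfl
  have hnd := entities_nodup (h :: t) i
  have hne := entities_ne_nil h t i
  have hlen1 : 1 ≤ (aEntities (h :: t) i).length := by
    cases hx : aEntities (h :: t) i with
    | nil => exact absurd hx hne
    | cons a l => simp
  rw [hform, PySem.Set.ofList_eq_self_of_nodup _ hnd]
  unfold bCell
  by_cases hone : (aEntities (h :: t) i).length = 1
  · have h2 : ¬ 1 < (aEntities (h :: t) i).length := by omega
    rw [if_neg h2]
    simp [hone]
  · have h1 : ((aEntities (h :: t) i).length == 1) = false := by simpa using hone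
    have h2 : 1 < (aEntities (h :: t) i).length := by omega
    simp [h1, h2]

-- interleaving of cells and relations
lemma interleave (rels : List String) : ∀ (cells : List String),
    rels.length ≤ cells.length → cells.length ≤ rels.length + 1 →
    (if rels.length < cells.length
      then (List.zip cells rels).flatMap (fun cr => [cr.1, cr.2]) ++ [PySem.List.pyGetD cells (-1) ""]
      else (List.zip cells rels).flatMap (fun cr => [cr.1, cr.2]))
    = (List.range cells.length).flatMap
        (fun j => if j < rels.length then [cells.getD j "", rels.getD j ""] else [cells.getD j ""]) := by
  induction rels with
  | nil =>
    intro cells h1 h2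
    cases cells with
    | nil => simp
    | cons c cs =>
      cases cs with
      | nil =>
        rw [if_pos (by simp)]
        rw [PySem.List.pyGetD_neg_one _ _ (by simp : ([c] : List String) ≠ [])]
        simp [List.range_succ]
      | cons d ds => simp at h2
  | cons r rs ih =>
    intro cells h1 h2
    cases cells with
    | nil => simp at h1
    | cons c cs =>
      have h1' : rs.length ≤ cs.length := by simp at h1; omega
      have h2' : cs.length ≤ rs.length + 1 := by simp at h2; omega
      have ihh := ih cs h1' h2'
      simp only [List.zip_cons_cons, List.flatMap_cons, List.length_cons]
      rw [List.range_succ_eq_map]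
      simp only [List.flatMap_cons, List.flatMap_map]
      rw [if_pos (by omega : 0 < rs.length + 1)]
      simp only [List.getD_cons_zero, List.getD_cons_succ, Nat.succ_eq_add_one, Nat.add_lt_add_iff_right]
      by_cases hc : rs.length < cs.length
      · have hcs : cs ≠ [] := by intro hnil; rw [hnil] at hc; simp at hc
        rw [if_pos hc]
        rw [PySem.List.pyGetD_neg_one _ _ (by simp : (c :: cs) ≠ [])]
        rw [List.getLast_cons hcs]
        rw [if_pos hc, PySem.List.pyGetD_neg_one _ _ hcs] at ihh
        rw [List.append_assoc, ihh]
      · rw [if_neg hc]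
        rw [if_neg hc] at ihh
        rw [ihh]

-- per-group merge equality
lemma merge_core (h : List String) (t : List (List String))
    (hl : ∀ p ∈ (h :: t), h.length ≤ p.length) :
    aMerge (h :: t) = bEmit ((pvSplit h).2) (colsOf (h :: t)) := by
  have hl' : ∀ p ∈ t, h.length ≤ p.length := fun p hp => hl p (by simp [hp])
  obtain ⟨hsl1, hsl2⟩ := pvSplit_len h
  obtain ⟨-, hsm2⟩ := pvSplit_map h
  have hcols := colsOf_char h t hl'
  have hcells : (colsOf (h :: t)).map bCell
      = (List.range ((h.length + 1) / 2)).map (fun (j : Nat) => aCell (h :: t) (2 * (j : Int))) := by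
    rw [hcols, List.map_map]
    apply List.map_congr_left
    intro j _
    exact cell_eq h t _
  have hcellslen : ((colsOf (h :: t)).map bCell).length = (h.length + 1) / 2 := by
    rw [hcells]; simp
  -- B side: zeta-reduce bEmit and turn the foldl into a flatMap
  have hB : bEmit ((pvSplit h).2) (colsOf (h :: t))
      = (if ((pvSplit h).2).length < ((colsOf (h :: t)).map bCell).length
          then (List.zip ((colsOf (h :: t)).map bCell) ((pvSplit h).2)).flatMap (fun cr => [cr.1, cr.2])
               ++ [PySem.List.pyGetD ((colsOf (h :: t)).map bCell) (-1) ""]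
          else (List.zip ((colsOf (h :: t)).map bCell) ((pvSplit h).2)).flatMap (fun cr => [cr.1, cr.2])) := by
    show (if ((pvSplit h).2).length < ((colsOf (h :: t)).map bCell).length
          then (List.zip ((colsOf (h :: t)).map bCell) ((pvSplit h).2)).foldl (fun a cr => a ++ [cr.1, cr.2]) []
               ++ [PySem.List.pyGetD ((colsOf (h :: t)).map bCell) (-1) ""]
          else (List.zip ((colsOf (h :: t)).map bCell) ((pvSplit h).2)).foldl (fun a cr => a ++ [cr.1, cr.2]) []) = _
    rw [PySem.List.foldl_append_eq_flatMap (fun (cr : String × String) => [cr.1, cr.2])]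
    simp
  -- A side: zeta-reduce aMerge and turn the foldl into a flatMap over even indices
  have h0 : PySem.List.pyGetD (h :: t) 0 ([] : List String) = h := PySem.List.pyGetD_zero_cons _ _ _
  have hA : aMerge (h :: t)
      = (List.range ((h.length + 1) / 2)).flatMap
          (fun (j : Nat) => if (0 + 2 * (j : Int)) < (h.length : Int) - 1
                    then [aCell (h :: t) (0 + 2 * (j : Int)), PySem.List.pyGetD h (0 + 2 * (j : Int) + 1) ""]
                    else [aCell (h :: t) (0 + 2 * (j : Int))]) := by
    show (PySem.List.pyRange 0 ((PySem.List.pyGetD (h :: t) 0 ([] : List String)).length : Int) 2).foldl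
        (fun acc i =>
          if i < ((PySem.List.pyGetD (h :: t) 0 ([] : List String)).length : Int) - 1
            then (acc ++ [aCell (h :: t) i]) ++ [PySem.List.pyGetD (PySem.List.pyGetD (h :: t) 0 ([] : List String)) (i + 1) ""]
            else acc ++ [aCell (h :: t) i]) [] = _
    rw [h0]
    have hfun : (fun (acc : List String) (i : Int) =>
        if i < (h.length : Int) - 1
          then (acc ++ [aCell (h :: t) i]) ++ [PySem.List.pyGetD h (i + 1) ""]
          else acc ++ [aCell (h :: t) i])
      = (fun (acc : List String) (i : Int) =>
          acc ++ (if i < (h.length : Int) - 1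
            then [aCell (h :: t) i, PySem.List.pyGetD h (i + 1) ""]
            else [aCell (h :: t) i])) := by
      funext acc i
      by_cases hc : i < (h.length : Int) - 1 <;> simp [hc]
    rw [hfun, PySem.List.foldl_append_eq_flatMap]
    rw [PySem.List.pyRange_of_pos 0 (h.length : Int) (by norm_num)]
    have hcnt : (if (0 : Int) < (h.length : Int) then (((h.length : Int) - 0 + 2 - 1) / 2).toNat else 0)
        = (h.length + 1) / 2 := by
      split_ifs with hcl <;> omega
    rw [hcnt, List.flatMap_map]
    simp only [List.nil_append]
  rw [hA, hB]
  rw [interleave ((pvSplit h).2) ((colsOf (h :: t)).map bCell)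
      (by rw [hcellslen, hsl2]; omega) (by rw [hcellslen, hsl2]; omega)]
  rw [hcellslen]
  have hpt : ∀ j ∈ List.range ((h.length + 1) / 2),
      (if (0 + 2 * (j : Int)) < (h.length : Int) - 1
        then [aCell (h :: t) (0 + 2 * (j : Int)), PySem.List.pyGetD h (0 + 2 * (j : Int) + 1) ""]
        else [aCell (h :: t) (0 + 2 * (j : Int))])
      = (if j < ((pvSplit h).2).length
        then [((colsOf (h :: t)).map bCell).getD j "", ((pvSplit h).2).getD j ""]
        else [((colsOf (h :: t)).map bCell).getD j ""]) := by
    intro j hj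
    have hj' : j < (h.length + 1) / 2 := List.mem_range.mp hj
    have hz : (0 + 2 * (j : Int)) = 2 * (j : Int) := by ring
    have hc1 : ((colsOf (h :: t)).map bCell).getD j "" = aCell (h :: t) (2 * (j : Int)) := by
      rw [hcells, PySem.List.getD_map_range _ _ _ _ hj']
    have hrel : PySem.List.pyGetD h (2 * (j : Int) + 1) "" = h.getD (2 * j + 1) "" := by
      rw [show (2 * (j : Int) + 1) = ((2 * j + 1 : Nat) : Int) from by push_cast; ring,
        PySem.List.pyGetD_natCast]
    rw [hz]
    by_cases hcm : j < h.length / 2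
    · rw [if_pos (by omega : (2 * (j : Int)) < (h.length : Int) - 1),
        if_pos (by rw [hsl2]; exact hcm), hc1, hrel]
      rw [hsm2, PySem.List.getD_map_range _ _ _ _ hcm]
    · rw [if_neg (by omega : ¬ (2 * (j : Int)) < (h.length : Int) - 1),
        if_neg (by rw [hsl2]; exact hcm), hc1]
  rw [List.flatMap_def, List.flatMap_def, List.map_congr_left hpt]

-- the verdict
theorem merge_paths_by_relations_remove_usless_spec : Claim_equal_merge_paths_by_relations_remove_usless := by
  intro paths _ hpre
  unfold Spec_merge_paths_by_relations_remove_usless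
  unfold merge_paths_by_relations_remove_usless merge_paths_by_relations_remove_usless_alt
  rw [PySem.List.foldl_append_singleton_eq_map, PySem.List.foldl_append_singleton_eq_map]
  rw [Achar, Bchar]
  rw [List.map_map, List.map_map]
  apply List.map_congr_left
  intro k hk
  simp only [Function.comp_def]
  have hkmem : k ∈ paths.map (fun p => (pvSplit p).2) := (PySem.Set.mem_ofList _ _).mp hk
  obtain ⟨p0, hp0, hp0k⟩ := List.mem_map.mp hkmem
  have hp0g : p0 ∈ pvGroup paths k := by
    unfold pvGroup; rw [List.mem_filter]; exact ⟨hp0, by simp [hp0k]⟩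
  cases hg : pvGroup paths k with
  | nil =>
    rw [hg] at hp0g
    simp at hp0g
  | cons h t =>
    have hhg : h ∈ pvGroup paths k := by rw [hg]; simp
    have hhk : (pvSplit h).2 = k := by
      unfold pvGroup at hhg
      have := (List.mem_filter.mp hhg).2
      simpa using this
    have hl : ∀ p ∈ (h :: t), h.length ≤ p.length := by
      intro p hp
      rw [← hg] at hp
      have hpp : p ∈ paths := by
        unfold pvGroup at hp; exact (List.mem_filter.mp hp).1
      have hpk : (pvSplit p).2 = k := by
        unfold pvGroup at hp
        have := (List.mem_filter.mp hp).2
        simpa using this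
      have hprep := hpre p hpp
      rw [hpk] at hprep
      have hfe : paths.filter (fun q => (pvSplit q).2 == k) = pvGroup paths k := rfl
      rw [hfe, hg] at hprep
      simpa using hprep
    rw [← hhk]
    exact merge_core h t hl
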